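-- pv_equiv track=rewrite | github.com/acasto/iptic-memex | actions/prompt_template_chat_action.py | _filter_by_role
-- ===== SOURCE A (Python) =====
-- from typing import Any, List, Tuple
--
-- def _filter_by_role(msgs: List[dict], mods: dict) -> List[dict]:
--     only = mods.get("only")
--     exclude = mods.get("exclude")
--     if not only and not exclude:
--         return msgs
--     filtered = msgs
--     if only:
--         targets = [r.strip().lower() for r in only.split(",") if r.strip()]
--         filtered = [m for m in filtered if str(m.get("role", "")).lower() in targets]
--     if exclude:
--         blocked = [r.strip().lower() for r in exclude.split(",") if r.strip()]
--         filtered = [m for m in filtered if str(m.get("role", "")).lower() not in blocked]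
--     return filtered
-- ===== SOURCE B (Python) =====
-- def _filter_by_role(msgs, mods):
--     only = mods.get("only")
--     exclude = mods.get("exclude")
--     if not only and not exclude:
--         return msgs
--     targets = {r.strip().lower() for r in only.split(",") if r.strip()} if only else None
--     blocked = {r.strip().lower() for r in exclude.split(",") if r.strip()} if exclude else set()
--
--     def keep(m):
--         role = str(m.get("role", "")).lower()
--         return (targets is None or role in targets) and role not in blocked
--
--     return [m for m in msgs if keep(m)]
-- ===== Notes on version B (the rewrite author's own statement) =====
-- stated objective: simpler
-- what changed: B parses both role lists up front into sets and filters msgs in a single pass with one combined keep-predicate, instead of A's two sequential list-filtering passes with list membership tests.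
import Mathlib
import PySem

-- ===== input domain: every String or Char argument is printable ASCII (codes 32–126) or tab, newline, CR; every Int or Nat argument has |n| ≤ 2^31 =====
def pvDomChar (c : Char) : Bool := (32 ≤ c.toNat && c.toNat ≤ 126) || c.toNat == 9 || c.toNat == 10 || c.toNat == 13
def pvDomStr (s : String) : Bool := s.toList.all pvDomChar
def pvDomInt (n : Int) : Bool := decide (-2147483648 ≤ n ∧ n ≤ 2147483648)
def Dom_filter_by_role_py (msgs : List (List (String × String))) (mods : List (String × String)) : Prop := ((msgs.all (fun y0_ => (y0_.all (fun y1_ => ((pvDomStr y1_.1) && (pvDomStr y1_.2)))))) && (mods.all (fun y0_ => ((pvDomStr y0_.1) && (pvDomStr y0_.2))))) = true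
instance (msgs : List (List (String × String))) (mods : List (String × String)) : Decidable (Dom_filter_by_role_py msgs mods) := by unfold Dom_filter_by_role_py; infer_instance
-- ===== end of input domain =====

-- B changes structure only: one combined filtering pass over msgs with set lookups, instead of A's two sequential passes (objective: simpler).

-- ===== PORT A =====
-- [r.strip().lower() for r in s.split(",") if r.strip()]
def pvParseRoles (s : String) : List String :=
  (((PySem.Str.split? s ",").getD []).filter (fun r => PySem.Str.strip r != "")).map
    (fun r => PySem.Str.lower (PySem.Str.strip r))

def filter_by_role_py (msgs : List (List (String × String))) (mods : List (String × String)) : List (List (String × String)) :=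
  let only := (PySem.Dict.get? (PySem.Dict.mk mods) "only").getD ""
  let exclude := (PySem.Dict.get? (PySem.Dict.mk mods) "exclude").getD ""
  if only == "" && exclude == "" then msgs
  else
    let filtered := msgs
    let filtered :=
      if only != "" then
        let targets := pvParseRoles only
        filtered.filter (fun m => targets.contains (PySem.Str.lower (PySem.Dict.getD (PySem.Dict.mk m) "role" "")))
      else filtered
    if exclude != "" then
      let blocked := pvParseRoles exclude
      filtered.filter (fun m => !(blocked.contains (PySem.Str.lower (PySem.Dict.getD (PySem.Dict.mk m) "role" ""))))
    else filtered

-- ===== PORT B =====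
-- {r.strip().lower() for r in s.split(",") if r.strip()}
def pvRoleSet (s : String) : PySem.Set String :=
  PySem.Set.ofList (((PySem.Str.split? s ",").getD []).filterMap (fun r =>
    let t := PySem.Str.strip r
    if t == "" then none else some (PySem.Str.lower t)))

def filter_by_role_py_alt (msgs : List (List (String × String))) (mods : List (String × String)) : List (List (String × String)) :=
  let only := (PySem.Dict.get? (PySem.Dict.mk mods) "only").getD ""
  let exclude := (PySem.Dict.get? (PySem.Dict.mk mods) "exclude").getD ""
  if only == "" && exclude == "" then msgs
  else
    let targets : Option (PySem.Set String) := if only == "" then none else some (pvRoleSet only)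
    let blocked : PySem.Set String := if exclude == "" then PySem.Set.empty else pvRoleSet exclude
    msgs.filter (fun m =>
      let role := PySem.Str.lower (PySem.Dict.getD (PySem.Dict.mk m) "role" "")
      (match targets with
       | none => true
       | some t => PySem.Set.contains t role) && !(PySem.Set.contains blocked role))

-- ===== PRECONDITION & SPEC =====
def Spec_filter_by_role_py (msgs : List (List (String × String))) (mods : List (String × String)) (out : List (List (String × String))) : Prop := out = filter_by_role_py_alt msgs mods
instance (msgs : List (List (String × String))) (mods : List (String × String)) (out : List (List (String × String))) : Decidable (Spec_filter_by_role_py msgs mods out) := by unfold Spec_filter_by_role_py; infer_instance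

-- ===== CLAIM (what is proved, stated in full; the proofs are below) =====
def Claim_equal_filter_by_role_py : Prop := ∀ (msgs : List (List (String × String))) (mods : List (String × String)), Dom_filter_by_role_py msgs mods → Spec_filter_by_role_py msgs mods (filter_by_role_py msgs mods)

-- ===== LEMMAS AND PROOFS =====

-- B's set holds exactly the members of A's parsed role list
theorem mem_pvRoleSet (s x : String) : x ∈ pvRoleSet s ↔ x ∈ pvParseRoles s := by
  unfold pvRoleSet pvParseRoles
  rw [PySem.Set.mem_ofList]
  simp only [List.mem_filterMap, List.mem_map, List.mem_filter]
  constructor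
  · rintro ⟨a, ha, h⟩
    by_cases hh : PySem.Str.strip a = "" <;> simp [hh] at h
    exact ⟨a, ⟨ha, by simp [hh]⟩, h⟩
  · rintro ⟨a, ⟨ha, hne⟩, h⟩
    refine ⟨a, ha, ?_⟩
    simp at hne
    simp [hne, h]

-- ===== VERDICT (by name: the statement is the Claim_ definition above) =====
theorem filter_by_role_py_spec : Claim_equal_filter_by_role_py := by
  intro msgs mods _
  unfold Spec_filter_by_role_py filter_by_role_py filter_by_role_py_alt
  set only := (PySem.Dict.get? (PySem.Dict.mk mods) "only").getD "" with honly
  set exclude := (PySem.Dict.get? (PySem.Dict.mk mods) "exclude").getD "" with hexc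
  by_cases h1 : only = "" <;> by_cases h2 : exclude = "" <;>
    simp [h1, h2, mem_pvRoleSet, List.filter_filter, Bool.and_comm]
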